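-- pv_equiv track=rewrite | github.com/wyk18703232953/myResearch | codeComplex/data/filteredData/python/linear/python_linear_0791.py | build_arrays
-- ===== SOURCE A (Python) =====
-- def build_arrays(n, k):
--     a = [0]
--     base = (n ^ (k * 3)) % 10
--     for i in range(1, n + 1):
--         a.append((base + (i * (k + 1))) % 10)
--     l = [0 for _ in range(n + 1)]
--     r = [0 for _ in range(n + 1)]
--     l[1], r[n] = 1, n
--     for i in range(2, n + 1):
--         if a[i - 1] == a[i]:
--             l[i] = l[i - 1]
--         else:
--             l[i] = i
--         if a[n - i + 1] == a[n - i + 2]: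
--             r[n - i + 1] = r[n - i + 2]
--         else:
--             r[n - i + 1] = n - i + 1
--     return a, l, r
-- ===== SOURCE B (Python) =====
-- def build_arrays(n, k):
--     base = (n ^ (k * 3)) % 10
--     a = [0] + [(base + i * (k + 1)) % 10 for i in range(1, n + 1)]
--     l = [0] * (n + 1)
--     r = [0] * (n + 1)
--     start = 1
--     for i in range(1, n + 1):
--         if i > 1 and a[i] != a[i - 1]:
--             for j in range(start, i):
--                 r[j] = i - 1
--             start = i
--         l[i] = start
--     for j in range(start, n + 1):
--         r[j] = n
--     return a, l, r
-- ===== Notes on version B (the rewrite author's own statement) =====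
-- stated objective: alternative
-- what changed: A fills l with a forward carry and r with a separate backward carry inside one index loop over preallocated arrays; B does a single forward run-segmentation scan keeping the current run's start, setting l[i]=start and closing each run with a block write r[j]=i-1 (final block r[j]=n), so r is produced forward block-by-block instead of by a backward recurrence.
import Mathlib
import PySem

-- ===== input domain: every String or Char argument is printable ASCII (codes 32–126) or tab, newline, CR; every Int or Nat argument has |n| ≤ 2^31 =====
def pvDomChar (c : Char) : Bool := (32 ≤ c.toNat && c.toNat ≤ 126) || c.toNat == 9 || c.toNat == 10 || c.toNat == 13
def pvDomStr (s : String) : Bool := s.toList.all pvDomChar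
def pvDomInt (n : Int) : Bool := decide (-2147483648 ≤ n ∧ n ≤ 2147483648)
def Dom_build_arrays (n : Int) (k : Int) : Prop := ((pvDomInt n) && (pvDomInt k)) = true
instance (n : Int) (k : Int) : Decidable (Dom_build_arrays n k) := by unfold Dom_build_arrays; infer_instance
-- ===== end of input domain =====

-- B replaces A's two coupled forward/backward in-place recurrences for l and r by a single
-- forward run-segmentation scan (track the current run's start; close each run by a block write
-- into r), same cost; equivalence proved for all n ≥ 1 (Python raises IndexError for n ≤ 0).


-- ===== PORT A =====
def build_arrays (n : Int) (k : Int) : List Int × List Int × List Int :=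
  let base := PySem.Int.mod (PySem.Int.bxor n (k * 3)) 10
  let a := (PySem.List.pyRange 1 (n+1) 1).foldl
      (fun acc i => acc ++ [PySem.Int.mod (base + i * (k + 1)) 10]) [0]
  let l := (PySem.List.pyRange 0 (n+1) 1).map (fun _ => (0:Int))
  let r := (PySem.List.pyRange 0 (n+1) 1).map (fun _ => (0:Int))
  -- l[1], r[n] = 1, n : pySetD is exact where the Python assignment succeeds; the IndexError (n ≤ 0) is excluded by Pre_
  let l := PySem.List.pySetD l 1 1
  let r := PySem.List.pySetD r n n
  let p := (PySem.List.pyRange 2 (n+1) 1).foldl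
    (fun (p : List Int × List Int) i =>
      -- a[…], l[…], r[…] reads/writes: pyGetD/pySetD, exact on the in-range indices this loop uses for n ≥ 1
      (if PySem.List.pyGetD a (i-1) 0 = PySem.List.pyGetD a i 0
         then PySem.List.pySetD p.1 i (PySem.List.pyGetD p.1 (i-1) 0)
         else PySem.List.pySetD p.1 i i,
       if PySem.List.pyGetD a (n-i+1) 0 = PySem.List.pyGetD a (n-i+2) 0
         then PySem.List.pySetD p.2 (n-i+1) (PySem.List.pyGetD p.2 (n-i+2) 0)
         else PySem.List.pySetD p.2 (n-i+1) (n-i+1))) (l, r)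
  (a, p.1, p.2)

-- ===== PORT B =====
def build_arrays_alt (n : Int) (k : Int) : List Int × List Int × List Int :=
  let base := PySem.Int.mod (PySem.Int.bxor n (k * 3)) 10
  let a := 0 :: (PySem.List.pyRange 1 (n+1) 1).map (fun i => PySem.Int.mod (base + i * (k + 1)) 10)
  let l := List.replicate (n+1).toNat (0:Int)   -- [0] * (n + 1)
  let r := List.replicate (n+1).toNat (0:Int)
  -- state: (l, r, start); start = first index of the run containing i
  let st := (PySem.List.pyRange 1 (n+1) 1).foldl
    (fun (st : List Int × List Int × Int) i =>
      if 1 < i ∧ PySem.List.pyGetD a i 0 ≠ PySem.List.pyGetD a (i-1) 0 then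
        ((PySem.List.pySetD st.1 i i),
         ((PySem.List.pyRange st.2.2 i 1).foldl (fun r j => PySem.List.pySetD r j (i-1)) st.2.1),
         i)
      else
        ((PySem.List.pySetD st.1 i st.2.2), st.2.1, st.2.2)) (l, r, 1)
  let r := (PySem.List.pyRange st.2.2 (n+1) 1).foldl (fun r j => PySem.List.pySetD r j n) st.2.1
  (a, st.1, r)

-- ===== PRECONDITION & SPEC =====
-- Pre_ excludes exactly n ≤ 0, where the Python A raises IndexError at `l[1], r[n] = 1, n`.
def Pre_build_arrays (n : Int) (k : Int) : Prop := 1 ≤ n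
instance (n : Int) (k : Int) : Decidable (Pre_build_arrays n k) := by unfold Pre_build_arrays; infer_instance
def pvWitness_build_arrays : Int × Int := (5, 4)

def Spec_build_arrays (n : Int) (k : Int) (out : List Int × List Int × List Int) : Prop := out = build_arrays_alt n k
instance (n : Int) (k : Int) (out : List Int × List Int × List Int) : Decidable (Spec_build_arrays n k out) := by unfold Spec_build_arrays; infer_instance

-- ===== CLAIM (what is proved, stated in full; the proofs are below) =====
def Claim_equal_build_arrays : Prop := ∀ (n : Int) (k : Int), Dom_build_arrays n k → Pre_build_arrays n k → Spec_build_arrays n k (build_arrays n k)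

-- ===== LEMMAS AND PROOFS =====

-- the digit at position j (Python: (base + j*(k+1)) % 10)
def pvG (n k : Int) (j : ℕ) : Int :=
  PySem.Int.mod (PySem.Int.mod (PySem.Int.bxor n (k * 3)) 10 + (j : Int) * (k + 1)) 10

-- first index of the run (maximal constant block of g) containing i, for 1 ≤ i
def pvLrun (g : ℕ → Int) : ℕ → ℕ
  | 0 => 0
  | 1 => 1
  | (i+2) => if g (i+1) = g (i+2) then pvLrun g (i+1) else i+2

-- last index of the run containing j (with right end N)
def pvRrun (g : ℕ → Int) (N j : ℕ) : ℕ :=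
  if h : j < N then (if g j = g (j+1) then pvRrun g N (j+1) else j) else N
termination_by N - j
decreasing_by omega

-- table: entry 0 is 0, entry t+1 is F t
def pvTab (N : ℕ) (F : ℕ → Int) : List Int := 0 :: (List.range N).map F

def pvLA (g : ℕ → Int) (m t : ℕ) : Int := if t+1 ≤ m then ((pvLrun g (t+1) : ℕ) : Int) else 0
def pvRA (g : ℕ → Int) (N m t : ℕ) : Int := if N ≤ t + m then ((pvRrun g N (t+1) : ℕ) : Int) else 0
def pvRB (g : ℕ → Int) (N s t : ℕ) : Int := if t+1 < s then ((pvRrun g N (t+1) : ℕ) : Int) else 0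

def pvA (n k : Int) : List Int := pvTab n.toNat (fun t => pvG n k (t+1))
def pvL (n k : Int) : List Int := pvTab n.toNat (fun t => ((pvLrun (pvG n k) (t+1) : ℕ) : Int))
def pvR (n k : Int) : List Int := pvTab n.toNat (fun t => ((pvRrun (pvG n k) n.toNat (t+1) : ℕ) : Int))

lemma pvTab_congr (N : ℕ) (F G : ℕ → Int) (h : ∀ t, t < N → F t = G t) : pvTab N F = pvTab N G := by
  unfold pvTab
  congr 1
  exact List.map_congr_left (fun t ht => h t (List.mem_range.mp ht))

lemma pvTab_get (N : ℕ) (F : ℕ → Int) (i : Int) (p : ℕ) (hip : i = ((p+1 : ℕ) : Int)) (hp : p < N) :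
    PySem.List.pyGetD (pvTab N F) i 0 = F p := by
  subst hip
  rw [PySem.List.pyGetD_natCast]
  simp [pvTab, List.getD, hp]

lemma pvTab_set (N : ℕ) (F : ℕ → Int) (i : Int) (p : ℕ) (v : Int) (hip : i = ((p+1 : ℕ) : Int)) (hp : p < N) :
    PySem.List.pySetD (pvTab N F) i v = pvTab N (fun t => if t = p then v else F t) := by
  subst hip
  rw [PySem.List.pySetD_natCast]
  unfold pvTab
  rw [List.set_cons_succ]
  congr 1
  apply List.ext_getElem (by simp)
  intro t h1 h2
  simp only [List.getElem_set, List.getElem_map, List.getElem_range]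
  by_cases hpt : p = t
  · simp [hpt]
  · rw [if_neg hpt, if_neg (fun h => hpt (Eq.symm h))]

lemma pvWrite (N : ℕ) (v : Int) (c : ℕ) : ∀ (s : ℕ) (F : ℕ → Int), 1 ≤ s → s + c ≤ N + 1 →
    (PySem.List.pyRange ((s:ℕ):Int) (((s+c:ℕ)):Int) 1).foldl (fun r j => PySem.List.pySetD r j v) (pvTab N F)
    = pvTab N (fun t => if s ≤ t+1 ∧ t+1 < s+c then v else F t) := by
  induction c with
  | zero =>
    intro s F h1 h2
    rw [Nat.add_zero, PySem.List.pyRange_one_eq_nil (le_refl _)]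
    apply pvTab_congr
    intro t ht
    rw [if_neg (by omega)]
  | succ c ih =>
    intro s F h1 h2
    have hb : ((s:ℕ):Int) < (((s+(c+1):ℕ)):Int) := by push_cast; omega
    rw [PySem.List.pyRange_one_cons hb, List.foldl_cons,
        pvTab_set N F ((s:ℕ):Int) (s-1) v (by push_cast; omega) (by omega)]
    have h1' : ((s:ℕ):Int) + 1 = (((s+1:ℕ)):Int) := by push_cast; ring
    have h2' : (((s+(c+1):ℕ)):Int) = ((((s+1)+c:ℕ)):Int) := by push_cast; ring
    rw [h1', h2', ih (s+1) _ (by omega) (by omega)]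
    apply pvTab_congr
    intro t ht
    split_ifs <;> first | rfl | omega

lemma pvLrun_bounds (g : ℕ → Int) : ∀ (c : ℕ), 1 ≤ c → 1 ≤ pvLrun g c ∧ pvLrun g c ≤ c
  | 0, h => absurd h (by omega)
  | 1, _ => by simp [pvLrun]
  | (i+2), _ => by
    have IH := pvLrun_bounds g (i+1) (by omega)
    unfold pvLrun
    split <;> omega

lemma pvLrun_const (g : ℕ → Int) : ∀ (c : ℕ) (j : ℕ), pvLrun g c ≤ j → j < c → g j = g (j+1)
  | 0, j, _, h2 => absurd h2 (by omega)
  | 1, j, h1, h2 => by simp [pvLrun] at h1; omega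
  | (i+2), j, h1, h2 => by
    unfold pvLrun at h1
    split at h1
    · rename_i heq
      by_cases hj : j = i+1
      · subst hj; exact heq
      · have IH := pvLrun_const g (i+1) j h1 (by omega)
        exact IH
    · omega

lemma pvLrun_succ_succ (g : ℕ → Int) (i : ℕ) :
    pvLrun g (i+2) = if g (i+1) = g (i+2) then pvLrun g (i+1) else i+2 := rfl

lemma pvRrun_lt (g : ℕ → Int) (N j : ℕ) (h : j < N) :
    pvRrun g N j = if g j = g (j+1) then pvRrun g N (j+1) else j := by
  rw [pvRrun]; simp [h]

lemma pvRrun_ge (g : ℕ → Int) (N j : ℕ) (h : N ≤ j) : pvRrun g N j = N := by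
  rw [pvRrun]; simp [Nat.not_lt.mpr h]

lemma pvRrun_run (g : ℕ → Int) (N e : ℕ) (hRe : pvRrun g N e = e) (heN : e ≤ N) :
    ∀ (d j : ℕ), e - j = d → j ≤ e → (∀ x, j ≤ x → x < e → g x = g (x+1)) → pvRrun g N j = e
  | 0, j, hd, hj, _ => by
    have : j = e := by omega
    subst this; exact hRe
  | (d+1), j, hd, hj, hconst => by
    have hje : j < e := by omega
    rw [pvRrun_lt g N j (by omega), if_pos (hconst j le_rfl hje)]
    exact pvRrun_run g N e hRe heN d (j+1) (by omega) (by omega)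
      (fun x hx1 hx2 => hconst x (by omega) hx2)

lemma pvA_tab (n k : Int) (N : ℕ) (hnN : n = (N:Int)) :
    pvA n k = pvTab N (fun t => pvG n k (t+1)) := by
  unfold pvA
  have : n.toNat = N := by omega
  rw [this]

lemma A_loop (n k : Int) (N : ℕ) (hnN : n = (N:Int)) (hN1 : 1 ≤ N) :
    ∀ c : ℕ, c + 1 ≤ N →
    ((List.range c).map (fun t => (2:Int) + (t:ℕ))).foldl
      (fun (p : List Int × List Int) i =>
        (if PySem.List.pyGetD (pvA n k) (i-1) 0 = PySem.List.pyGetD (pvA n k) i 0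
           then PySem.List.pySetD p.1 i (PySem.List.pyGetD p.1 (i-1) 0)
           else PySem.List.pySetD p.1 i i,
         if PySem.List.pyGetD (pvA n k) (n-i+1) 0 = PySem.List.pyGetD (pvA n k) (n-i+2) 0
           then PySem.List.pySetD p.2 (n-i+1) (PySem.List.pyGetD p.2 (n-i+2) 0)
           else PySem.List.pySetD p.2 (n-i+1) (n-i+1)))
      (pvTab N (pvLA (pvG n k) 1), pvTab N (pvRA (pvG n k) N 1))
    = (pvTab N (pvLA (pvG n k) (c+1)), pvTab N (pvRA (pvG n k) N (c+1))) := by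
  intro c
  induction c with
  | zero => intro _; simp
  | succ c ih =>
    intro hc
    rw [List.range_succ, List.map_append, List.foldl_append, ih (by omega)]
    simp only [List.map_cons, List.map_nil, List.foldl_cons, List.foldl_nil]
    rw [pvA_tab n k N hnN]
    -- the four indices of this iteration, as ℕ casts
    have e1 : (2:Int) + (c:ℕ) - 1 = ((c+1:ℕ):Int) := by omega
    have e2 : (2:Int) + (c:ℕ) = ((c+2:ℕ):Int) := by omega
    have e3 : n - ((2:Int) + (c:ℕ)) + 1 = ((N-c-2+1:ℕ):Int) := by omega
    have e4 : n - ((2:Int) + (c:ℕ)) + 2 = ((N-c-1+1:ℕ):Int) := by omega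
    rw [pvTab_get N (fun t => pvG n k (t+1)) _ c e1 (by omega),
        pvTab_get N (fun t => pvG n k (t+1)) _ (c+1) e2 (by omega),
        pvTab_get N (fun t => pvG n k (t+1)) _ (N-c-2) e3 (by omega),
        pvTab_get N (fun t => pvG n k (t+1)) _ (N-c-1) e4 (by omega),
        pvTab_get N (pvLA (pvG n k) (c+1)) _ c e1 (by omega),
        pvTab_get N (pvRA (pvG n k) N (c+1)) _ (N-c-1) e4 (by omega)]
    have hidx1 : (N-c-2) + 1 = N-c-1 := by omega
    have hidx2 : (N-c-1) + 1 = N-c := by omega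
    rw [hidx1, hidx2]
    simp only [Prod.mk.injEq]
    constructor
    · -- l component
      by_cases hgc : pvG n k (c+1) = pvG n k (c+2)
      · rw [if_pos hgc, pvTab_set N (pvLA (pvG n k) (c+1)) _ (c+1) _ e2 (by omega)]
        apply pvTab_congr
        intro t ht
        have hL : pvLrun (pvG n k) (c+2) = pvLrun (pvG n k) (c+1) := by
          rw [pvLrun_succ_succ, if_pos hgc]
        by_cases htc : t = c+1
        · subst htc
          rw [if_pos rfl]
          unfold pvLA
          rw [if_pos (by omega), if_pos (by omega), show c+1+1 = c+2 from rfl, hL]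
        · rw [if_neg htc]
          unfold pvLA
          split_ifs <;> first | rfl | omega
      · rw [if_neg hgc, pvTab_set N (pvLA (pvG n k) (c+1)) _ (c+1) _ e2 (by omega)]
        apply pvTab_congr
        intro t ht
        have hL : pvLrun (pvG n k) (c+2) = c+2 := by
          rw [pvLrun_succ_succ, if_neg hgc]
        by_cases htc : t = c+1
        · subst htc
          rw [if_pos rfl]
          unfold pvLA
          rw [if_pos (by omega), show c+1+1 = c+2 from rfl, hL, e2]
        · rw [if_neg htc]
          unfold pvLA
          split_ifs <;> first | rfl | omega
    · -- r component
      have hget : pvRA (pvG n k) N (c+1) (N-c-1) = ((pvRrun (pvG n k) N (N-c) : ℕ) : Int) := by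
        unfold pvRA
        rw [if_pos (by omega), hidx2]
      by_cases hgr : pvG n k (N-c-1) = pvG n k (N-c)
      · rw [if_pos hgr, hget, pvTab_set N (pvRA (pvG n k) N (c+1)) _ (N-c-2) _ e3 (by omega)]
        have hR : pvRrun (pvG n k) N (N-c-1) = pvRrun (pvG n k) N (N-c) := by
          rw [pvRrun_lt _ _ _ (by omega), hidx2, if_pos hgr]
        apply pvTab_congr
        intro t ht
        by_cases htc : t = N-c-2
        · subst htc
          rw [if_pos rfl]
          unfold pvRA
          rw [if_pos (by omega), hidx1, hR]
        · rw [if_neg htc]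
          unfold pvRA
          split_ifs <;> first | rfl | omega
      · rw [if_neg hgr, pvTab_set N (pvRA (pvG n k) N (c+1)) _ (N-c-2) _ e3 (by omega)]
        have hR : pvRrun (pvG n k) N (N-c-1) = N-c-1 := by
          rw [pvRrun_lt _ _ _ (by omega), hidx2, if_neg hgr]
        apply pvTab_congr
        intro t ht
        by_cases htc : t = N-c-2
        · subst htc
          rw [if_pos rfl]
          unfold pvRA
          rw [if_pos (by omega), hidx1, hR, e3]
          omega
        · rw [if_neg htc]
          unfold pvRA
          split_ifs <;> first | rfl | omega

lemma pv_zeros (n : Int) (N : ℕ) (hnN : n = (N:Int)) :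
    (PySem.List.pyRange 0 (n+1) 1).map (fun _ => (0:Int)) = pvTab N (fun _ => 0) := by
  rw [PySem.List.pyRange_one]
  have h : (n+1-0).toNat = N+1 := by omega
  rw [h, List.map_map]
  apply List.ext_getElem
  · simp [pvTab]
  · intro i h1 h2
    rcases i with _ | j <;> simp [pvTab]

lemma pvA_fold (n k : Int) (N : ℕ) (hnN : n = (N:Int)) :
    (PySem.List.pyRange 1 (n+1) 1).foldl
      (fun acc i => acc ++ [PySem.Int.mod (PySem.Int.mod (PySem.Int.bxor n (k*3)) 10 + i*(k+1)) 10]) [0]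
    = pvA n k := by
  rw [PySem.List.foldl_append_singleton_eq_map, PySem.List.pyRange_one]
  have h : (n+1-1).toNat = N := by omega
  rw [h, List.map_map, pvA_tab n k N hnN]
  unfold pvTab
  simp only [List.singleton_append]
  congr 1
  apply List.map_congr_left
  intro t ht
  simp only [Function.comp_apply]
  unfold pvG
  congr 2
  push_cast
  ring

lemma portA_eq (n k : Int) (hn : 1 ≤ n) : build_arrays n k = (pvA n k, pvL n k, pvR n k) := by
  obtain ⟨N, hnN, hN1⟩ : ∃ N : ℕ, n = (N:Int) ∧ 1 ≤ N := ⟨n.toNat, by omega, by omega⟩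
  have hNt : n.toNat = N := by omega
  simp only [build_arrays]
  rw [pvA_fold n k N hnN, pv_zeros n N hnN,
      pvTab_set N (fun _ => 0) 1 0 1 (by omega) (by omega),
      pvTab_set N _ n (N-1) n (by omega) (by omega)]
  have hL1 : pvTab N (fun t => if t = 0 then (1:Int) else 0) = pvTab N (pvLA (pvG n k) 1) := by
    apply pvTab_congr
    intro t ht
    unfold pvLA
    by_cases h0 : t = 0
    · subst h0; simp [pvLrun]
    · rw [if_neg h0, if_neg (by omega)]
  have hR1 : pvTab N (fun t => if t = N-1 then n else (0:Int))
      = pvTab N (pvRA (pvG n k) N 1) := by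
    apply pvTab_congr
    intro t ht
    unfold pvRA
    by_cases h0 : t = N-1
    · subst h0
      rw [if_pos rfl, if_pos (by omega), pvRrun_ge (pvG n k) N (N-1+1) (by omega)]
      omega
    · rw [if_neg h0, if_neg (by omega)]
  rw [hL1, hR1, PySem.List.pyRange_one]
  have h2 : (n+1-2).toNat = N-1 := by omega
  rw [h2, A_loop n k N hnN hN1 (N-1) (by omega)]
  have hLfin : pvTab N (pvLA (pvG n k) (N-1+1)) = pvL n k := by
    unfold pvL
    rw [hNt]
    apply pvTab_congr
    intro t ht
    unfold pvLA
    rw [if_pos (by omega)]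
  have hRfin : pvTab N (pvRA (pvG n k) N (N-1+1)) = pvR n k := by
    unfold pvR
    rw [hNt]
    apply pvTab_congr
    intro t ht
    unfold pvRA
    rw [if_pos (by omega)]
  rw [hLfin, hRfin]

lemma pvB_a (n k : Int) (N : ℕ) (hnN : n = (N:Int)) :
    (0 :: (PySem.List.pyRange 1 (n+1) 1).map
      (fun i => PySem.Int.mod (PySem.Int.mod (PySem.Int.bxor n (k*3)) 10 + i*(k+1)) 10))
    = pvA n k := by
  rw [PySem.List.pyRange_one]
  have h : (n+1-1).toNat = N := by omega
  rw [h, List.map_map, pvA_tab n k N hnN]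
  unfold pvTab
  congr 1
  apply List.map_congr_left
  intro t ht
  simp only [Function.comp_apply]
  unfold pvG
  congr 2
  push_cast
  ring

lemma pv_repl (n : Int) (N : ℕ) (hnN : n = (N:Int)) (hN0 : 0 ≤ n) :
    List.replicate (n+1).toNat (0:Int) = pvTab N (fun _ => 0) := by
  have h : (n+1).toNat = N+1 := by omega
  rw [h]
  apply List.ext_getElem
  · simp [pvTab]
  · intro i h1 h2
    rcases i with _ | j <;> simp [pvTab]

lemma B_loop (n k : Int) (N : ℕ) (hnN : n = (N:Int)) (hN1 : 1 ≤ N) :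
    ∀ c : ℕ, 1 ≤ c → c ≤ N →
    ((List.range c).map (fun t => (1:Int) + (t:ℕ))).foldl
      (fun (st : List Int × List Int × Int) i =>
        if 1 < i ∧ PySem.List.pyGetD (pvA n k) i 0 ≠ PySem.List.pyGetD (pvA n k) (i-1) 0 then
          ((PySem.List.pySetD st.1 i i),
           ((PySem.List.pyRange st.2.2 i 1).foldl (fun r j => PySem.List.pySetD r j (i-1)) st.2.1),
           i)
        else
          ((PySem.List.pySetD st.1 i st.2.2), st.2.1, st.2.2))
      (pvTab N (fun _ => 0), pvTab N (fun _ => 0), 1)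
    = (pvTab N (pvLA (pvG n k) c), pvTab N (pvRB (pvG n k) N (pvLrun (pvG n k) c)),
       ((pvLrun (pvG n k) c : ℕ) : Int)) := by
  intro c
  induction c with
  | zero => intro h; omega
  | succ c ih =>
    intro _ hc
    by_cases hc1 : c = 0
    · -- first iteration i = 1
      subst hc1
      simp only [List.range_succ, List.range_zero, List.map_nil, List.nil_append, List.map_cons,
        List.foldl_cons, List.foldl_nil]
      rw [if_neg (fun h => absurd h.1 (by norm_num))]
      rw [pvTab_set N (fun _ => 0) _ 0 _ (by omega) (by omega)]
      simp only [Prod.mk.injEq]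
      refine ⟨?_, ?_, ?_⟩
      · apply pvTab_congr
        intro t ht
        unfold pvLA
        by_cases h0 : t = 0
        · subst h0; simp [pvLrun]
        · rw [if_neg h0, if_neg (by omega)]
      · apply pvTab_congr
        intro t ht
        unfold pvRB
        rw [if_neg (by simp [pvLrun])]
      · simp [pvLrun]
    · have hc1' : 1 ≤ c := by omega
      rw [List.range_succ, List.map_append, List.foldl_append, ih hc1' (by omega)]
      simp only [List.map_cons, List.map_nil, List.foldl_cons, List.foldl_nil]
      have hs := pvLrun_bounds (pvG n k) c hc1'
      have e2 : (1:Int) + (c:ℕ) = ((c+1:ℕ):Int) := by omega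
      have e1 : (1:Int) + (c:ℕ) - 1 = ((c-1+1:ℕ):Int) := by omega
      rw [pvA_tab n k N hnN]
      rw [pvTab_get N (fun t => pvG n k (t+1)) _ c e2 (by omega),
          pvTab_get N (fun t => pvG n k (t+1)) _ (c-1) e1 (by omega)]
      rw [show c-1+1 = c from by omega]
      by_cases hg : pvG n k (c+1) = pvG n k c
      · rw [if_neg (fun h => h.2 hg)]
        have hL : pvLrun (pvG n k) (c+1) = pvLrun (pvG n k) c := by
          have h2 := pvLrun_succ_succ (pvG n k) (c-1)
          rw [show c-1+2 = c+1 from by omega, show c-1+1 = c from by omega] at h2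
          rw [h2, if_pos hg.symm]
        rw [pvTab_set N (pvLA (pvG n k) c) _ c _ e2 (by omega)]
        simp only [Prod.mk.injEq]
        refine ⟨?_, ?_, ?_⟩
        · apply pvTab_congr
          intro t ht
          unfold pvLA
          by_cases htc : t = c
          · subst htc
            rw [if_pos rfl, if_pos (by omega), hL]
          · rw [if_neg htc]
            split_ifs <;> first | rfl | omega
        · rw [hL]
        · rw [hL]
      · rw [if_pos ⟨by omega, fun h => hg h⟩]
        have hL : pvLrun (pvG n k) (c+1) = c+1 := by
          have h2 := pvLrun_succ_succ (pvG n k) (c-1)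
          rw [show c-1+2 = c+1 from by omega, show c-1+1 = c from by omega] at h2
          rw [h2, if_neg (fun h => hg h.symm)]
        have hRc : pvRrun (pvG n k) N c = c := by
          rw [pvRrun_lt (pvG n k) N c (by omega), if_neg (fun h => hg h.symm)]
        simp only [Prod.mk.injEq]
        refine ⟨?_, ?_, ?_⟩
        · -- l component
          rw [pvTab_set N (pvLA (pvG n k) c) _ c _ e2 (by omega)]
          apply pvTab_congr
          intro t ht
          unfold pvLA
          by_cases htc : t = c
          · subst htc
            rw [if_pos rfl, if_pos (by omega), hL, e2]
          · rw [if_neg htc]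
            split_ifs <;> first | rfl | omega
        · -- r component: close the run [Lrun c, c] with value c
          simp only [show (1:Int) + (c:ℕ) - 1 = ((c:ℕ):Int) from by omega]
          simp only [show (1:Int) + (c:ℕ) = ((pvLrun (pvG n k) c + (c+1 - pvLrun (pvG n k) c) : ℕ) : Int)
              from by push_cast [Nat.cast_sub (by omega : pvLrun (pvG n k) c ≤ c+1)]; omega]
          rw [pvWrite N ((c:ℕ):Int) (c+1 - pvLrun (pvG n k) c) (pvLrun (pvG n k) c) _
              (by omega) (by omega)]
          apply pvTab_congr
          intro t ht
          unfold pvRB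
          rw [hL]
          by_cases h1 : pvLrun (pvG n k) c ≤ t+1 ∧ t+1 < pvLrun (pvG n k) c + (c+1 - pvLrun (pvG n k) c)
          · rw [if_pos h1, if_pos (by omega)]
            have hrun : pvRrun (pvG n k) N (t+1) = c := by
              apply pvRrun_run (pvG n k) N c hRc (by omega) (c - (t+1)) (t+1) rfl (by omega)
              intro x hx1 hx2
              exact pvLrun_const (pvG n k) c x (by omega) hx2
            rw [hrun]
          · rw [if_neg h1]
            split_ifs <;> first | rfl | omega
        · rw [hL, e2]

lemma portB_eq (n k : Int) (hn : 1 ≤ n) : build_arrays_alt n k = (pvA n k, pvL n k, pvR n k) := by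
  obtain ⟨N, hnN, hN1⟩ : ∃ N : ℕ, n = (N:Int) ∧ 1 ≤ N := ⟨n.toNat, by omega, by omega⟩
  have hNt : n.toNat = N := by omega
  simp only [build_arrays_alt]
  rw [pvB_a n k N hnN, pv_repl n N hnN (by omega), PySem.List.pyRange_one 1 (n+1)]
  have h : (n+1-1).toNat = N := by omega
  rw [h, B_loop n k N hnN hN1 N hN1 (le_refl N)]
  simp only []
  have hs := pvLrun_bounds (pvG n k) N hN1
  have hRN : pvRrun (pvG n k) N N = N := pvRrun_ge (pvG n k) N N (le_refl N)
  -- final block write: r[j] = n for j in range(start, n+1)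
  simp only [show (n:Int) + 1 = ((pvLrun (pvG n k) N + (N+1 - pvLrun (pvG n k) N) : ℕ) : Int)
      from by push_cast [Nat.cast_sub (by omega : pvLrun (pvG n k) N ≤ N+1)]; omega]
  rw [pvWrite N n (N+1 - pvLrun (pvG n k) N) (pvLrun (pvG n k) N) _ (by omega) (by omega)]
  have hLfin : pvTab N (pvLA (pvG n k) N) = pvL n k := by
    unfold pvL
    rw [hNt]
    apply pvTab_congr
    intro t ht
    unfold pvLA
    rw [if_pos (by omega)]
  rw [hLfin]
  have hRfin : pvTab N (fun t =>
      if pvLrun (pvG n k) N ≤ t+1 ∧ t+1 < pvLrun (pvG n k) N + (N+1 - pvLrun (pvG n k) N) then n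
      else pvRB (pvG n k) N (pvLrun (pvG n k) N) t) = pvR n k := by
    unfold pvR
    rw [hNt]
    apply pvTab_congr
    intro t ht
    by_cases h1 : pvLrun (pvG n k) N ≤ t+1
    · rw [if_pos ⟨h1, by omega⟩]
      have hrun : pvRrun (pvG n k) N (t+1) = N := by
        apply pvRrun_run (pvG n k) N N hRN (le_refl N) (N - (t+1)) (t+1) rfl (by omega)
        intro x hx1 hx2
        exact pvLrun_const (pvG n k) N x (by omega) hx2
      rw [hrun]
      omega
    · rw [if_neg (fun h => h1 h.1)]
      unfold pvRB
      rw [if_pos (by omega)]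
  rw [hRfin]

-- ===== VERDICT (by name: the statement is the Claim_ definition above) =====
theorem build_arrays_spec : Claim_equal_build_arrays := by
  intro n k _ hpre
  unfold Spec_build_arrays
  rw [portA_eq n k hpre, portB_eq n k hpre]
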